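-- pv_equiv track=rewrite | github.com/yeojeong735/coding_test | 프로그래머스/1/12982. 예산/예산.py | solution
-- ===== SOURCE A (Python) =====
-- def solution(d, budget):
--     answer = 0
--
--     d.sort()
--
--     for request in d:
--         if budget >= request:
--             budget -= request
--             answer += 1
--         else:
--             break
--
--
--     return answer
-- ===== SOURCE B (Python) =====
-- from itertools import accumulate
--
-- def solution(d, budget):
--     d.sort()
--     # A prefix of length k is fully fundable iff the maximum of its cumulative
--     # costs is <= budget; count all such prefixes (no early exit, no mutation).
--     return sum(m <= budget for m in accumulate(accumulate(d), max))
-- ===== Notes on version B (the rewrite author's own statement) =====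
-- stated objective: alternative
-- what changed: B counts, over all n prefixes of the sorted requests, those whose running-maximum cumulative cost (accumulate of accumulate with max) stays within budget, instead of A's subtract-from-budget greedy loop with an early break.
import Mathlib
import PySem

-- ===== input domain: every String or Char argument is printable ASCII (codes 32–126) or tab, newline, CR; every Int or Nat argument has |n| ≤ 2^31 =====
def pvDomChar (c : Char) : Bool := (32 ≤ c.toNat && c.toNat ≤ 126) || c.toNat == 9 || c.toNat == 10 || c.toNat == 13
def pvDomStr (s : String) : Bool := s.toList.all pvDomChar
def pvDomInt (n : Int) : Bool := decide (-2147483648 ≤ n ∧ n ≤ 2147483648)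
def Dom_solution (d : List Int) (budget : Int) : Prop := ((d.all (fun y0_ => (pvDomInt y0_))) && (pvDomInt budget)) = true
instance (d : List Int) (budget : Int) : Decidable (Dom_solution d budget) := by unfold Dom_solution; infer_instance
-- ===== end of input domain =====

-- B counts, over all prefixes of the sorted requests, those whose running-maximum
-- cumulative cost stays within budget (accumulate of accumulate with max) instead of
-- A's subtract-and-break greedy loop; return value only — both Pythons sort d in
-- place, which a caller can observe.

-- ===== PORT A =====
-- 'for request in d: if budget >= request: budget -= request; answer += 1 else: break'
def solutionLoop : List Int → Int → Int → Int
  | [], _, answer => answer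
  | request :: rest, budget, answer =>
      if budget ≥ request then solutionLoop rest (budget - request) (answer + 1)
      else answer

def solution (d : List Int) (budget : Int) : Int :=
  solutionLoop (PySem.List.sorted d (fun x => x) false) budget 0

-- ===== PORT B =====
-- itertools.accumulate(d): running sums (s = sum accumulated so far)
def accumFrom : List Int → Int → List Int
  | [], _ => []
  | x :: xs, s => (s + x) :: accumFrom xs (s + x)

-- itertools.accumulate(ps, max): running maxima (m = maximum so far)
def runMaxFrom : List Int → Int → List Int
  | [], _ => []
  | x :: xs, m => (max m x) :: runMaxFrom xs (max m x)

def runMax : List Int → List Int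
  | [] => []
  | x :: xs => x :: runMaxFrom xs x

-- sum(m <= budget for m in accumulate(accumulate(d), max)) over sorted d
def solution_alt (d : List Int) (budget : Int) : Int :=
  ((runMax (accumFrom (PySem.List.sorted d (fun x => x) false) 0)).countP
      (fun m => m ≤ budget) : Nat)

-- ===== PRECONDITION & SPEC =====
def Spec_solution (d : List Int) (budget : Int) (out : Int) : Prop := out = solution_alt d budget
instance (d : List Int) (budget : Int) (out : Int) : Decidable (Spec_solution d budget out) := by unfold Spec_solution; infer_instance

-- ===== CLAIM (what is proved, stated in full; the proofs are below) =====
def Claim_equal_solution : Prop := ∀ (d : List Int) (budget : Int), Dom_solution d budget → Spec_solution d budget (solution d budget)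

-- ===== LEMMAS AND PROOFS =====

-- A's loop computes the length of the initial run of prefix sums ≤ budget
theorem solutionLoop_eq_takeWhile (l : List Int) (b a s : Int) :
    solutionLoop l b a
      = a + ((accumFrom l s).takeWhile (fun c => c ≤ s + b)).length := by
  induction l generalizing b a s with
  | nil => simp [solutionLoop, accumFrom]
  | cons x xs ih =>
    simp only [solutionLoop, accumFrom, List.takeWhile]
    by_cases h : b ≥ x
    · have hc : (s + x ≤ s + b) := by omega
      rw [if_pos h, ih (b - x) (a + 1) (s + x)]
      have h2 : s + x + (b - x) = s + b := by ring
      rw [h2]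
      simp only [hc, decide_true, List.length_cons]
      push_cast
      ring
    · have hc : ¬ (s + x ≤ s + b) := by omega
      simp [h, hc]

-- counting running maxima ≤ B equals the initial-run length, given the carry m
theorem countP_runMaxFrom (ps : List Int) (m B : Int) :
    ((runMaxFrom ps m).countP (fun v => v ≤ B))
      = if m ≤ B then (ps.takeWhile (fun c => c ≤ B)).length else 0 := by
  induction ps generalizing m with
  | nil => simp [runMaxFrom]
  | cons x xs ih =>
    simp only [runMaxFrom, List.countP_cons, List.takeWhile, ih (max m x)]
    by_cases hm : m ≤ B
    · by_cases hx : x ≤ B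
      · have h1 : max m x ≤ B := by omega
        simp [hm, hx, h1]
      · have h1 : ¬ max m x ≤ B := by omega
        simp [hm, hx, h1]
    · have h1 : ¬ max m x ≤ B := by omega
      simp [hm, h1]

theorem countP_runMax (ps : List Int) (B : Int) :
    ((runMax ps).countP (fun v => v ≤ B))
      = (ps.takeWhile (fun c => c ≤ B)).length := by
  cases ps with
  | nil => simp [runMax]
  | cons x xs =>
    simp only [runMax, List.countP_cons, List.takeWhile, countP_runMaxFrom]
    by_cases hx : x ≤ B <;> simp [hx]

-- ===== VERDICT (by name: the statement is the Claim_ definition above) =====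
theorem solution_spec : Claim_equal_solution := by
  intro d budget _
  unfold Spec_solution solution solution_alt
  rw [countP_runMax, solutionLoop_eq_takeWhile _ budget 0 0]
  simp
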